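-- pv_equiv track=rewrite | github.com/moken20/molecule-benchmarks | molbench/wfn.py | to_jw_bitstring
-- ===== SOURCE A (Python) =====
-- def _int_to_bitstring(x: int, n_orb: int) -> str:
--     """Convert an integer to a bitstring."""
--     return "".join([str((x >> i) & 1) for i in range(n_orb)])
--
-- def to_jw_bitstring(alpha: int, beta: int, n_orb: int, endian: str = "little") -> str:
--     """
--     Convert a pair of alpha and beta bitstrings to a single Jordan-Wigner
--     transformed bitstring.
--
--     Args:
--         alpha: Alpha spin occupation bitstring (uint64 integer).
--         beta: Beta spin occupation bitstring (uint64 integer).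
--         n_orb: Number of spatial orbitals.
--         endian: Bit ordering.
--             "big": MSB first (highest orbital index at leftmost).
--             "little": LSB first (lowest orbital index at leftmost).
--
--     Returns:
--         String of '0' and '1' characters representing the combined JW bitstring
--         (length = 2 * n_orb).
--
--     Example:
--         >>> WFN.to_jw_bitstring(alpha=0b011, beta=0b101, n_orb=3, endian="big")
--         '011110'  # orbital2: α=0,β=1 | orbital1: α=1,β=0 | orbital0: α=1,β=1
--         >>> WFN.to_jw_bitstring(alpha=0b011, beta=0b101, n_orb=3, endian="little")
--         '111001'  # orbital0: α=1,β=1 | orbital1: α=1,β=0 | orbital2: α=0,β=1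
--     """
--     if endian not in ("big", "little"):
--         raise ValueError(f"endian must be 'big' or 'little', got {endian!r}")
--
--     bits = []
--     for i in range(n_orb):
--         bits.append(_int_to_bitstring(alpha >> i, 1))
--         bits.append(_int_to_bitstring(beta >> i, 1))
--
--     if endian == "big":
--         return ''.join(reversed(bits))
--     else:
--         return ''.join(bits)
-- ===== SOURCE B (Python) =====
-- def to_jw_bitstring(alpha: int, beta: int, n_orb: int, endian: str = "little") -> str:
--     if endian not in ("big", "little"):
--         raise ValueError(f"endian must be 'big' or 'little', got {endian!r}")
--     # Phase 1: pack the interleaved occupation bits into one integer.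
--     packed = 0
--     for i in range(n_orb):
--         packed += (((alpha >> i) & 1) + 2 * ((beta >> i) & 1)) << (2 * i)
--     # Phase 2: emit the digits of the packed integer.
--     s = ''.join(str((packed >> j) & 1) for j in range(2 * n_orb))
--     return s[::-1] if endian == "big" else s
-- ===== Notes on version B (the rewrite author's own statement) =====
-- stated objective: alternative
-- what changed: A builds a list of one-character strings, appending the alpha and beta bit of each orbital per iteration, and joins it (reversed for big-endian); B uses a two-phase algorithm on a different data structure: it first packs all interleaved occupation bits into a single integer accumulator (bit 2i = alpha bit i, bit 2i+1 = beta bit i), then decodes that packed integer's low 2*n_orb binary digits into the output string, reversing the string itself for big-endian.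
import Mathlib
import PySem

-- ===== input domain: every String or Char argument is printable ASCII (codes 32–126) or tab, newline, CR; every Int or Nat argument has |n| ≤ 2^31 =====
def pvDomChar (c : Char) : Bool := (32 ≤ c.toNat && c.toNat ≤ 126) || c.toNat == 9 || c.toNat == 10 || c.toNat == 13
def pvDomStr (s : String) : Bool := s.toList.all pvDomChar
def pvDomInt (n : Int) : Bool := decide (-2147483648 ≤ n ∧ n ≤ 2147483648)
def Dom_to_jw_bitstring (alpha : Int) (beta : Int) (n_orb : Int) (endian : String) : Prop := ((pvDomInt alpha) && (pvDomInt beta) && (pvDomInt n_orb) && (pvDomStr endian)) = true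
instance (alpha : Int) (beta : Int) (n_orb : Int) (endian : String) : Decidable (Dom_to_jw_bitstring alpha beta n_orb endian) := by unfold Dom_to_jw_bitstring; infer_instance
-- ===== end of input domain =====

-- B replaces A's per-orbital list of one-character strings by a two-phase algorithm on a different
-- data structure: it first packs all occupation bits into ONE integer accumulator, then decodes
-- that integer's binary digits into the output string (alternative decomposition, same cost).

-- ===== PORT A =====
-- Python's `x >> i` for the nonnegative i produced by range() is `x >>> i.toNat`
-- (arithmetic shift; Python-exact also on negative x)
def int_to_bitstring (x : Int) (n_orb : Int) : String :=
  PySem.Str.join "" ((PySem.List.pyRange 0 n_orb).map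
    (fun i => PySem.Int.toStr (PySem.Int.band (Int.shiftRight x i.toNat) 1)))

def to_jw_bitstring (alpha : Int) (beta : Int) (n_orb : Int) (endian : String) : String :=
  if endian ≠ "big" ∧ endian ≠ "little" then ""  -- raise ValueError: excluded by Pre_
  else
    let bits := (PySem.List.pyRange 0 n_orb).foldl
      (fun acc i => acc ++ [int_to_bitstring (Int.shiftRight alpha i.toNat) 1,
                            int_to_bitstring (Int.shiftRight beta i.toNat) 1]) []
    if endian = "big" then PySem.Str.join "" bits.reverse
    else PySem.Str.join "" bits

-- ===== PORT B =====
-- `x << k` for the nonnegative k = 2*i produced in the loop is `x <<< (2*i).toNat` (Python-exact)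
def to_jw_bitstring_alt (alpha : Int) (beta : Int) (n_orb : Int) (endian : String) : String :=
  if endian ≠ "big" ∧ endian ≠ "little" then ""  -- raise ValueError: excluded by Pre_
  else
    -- Phase 1: pack the interleaved occupation bits into one integer.
    let packed := (PySem.List.pyRange 0 n_orb).foldl
      (fun acc i => acc + ((PySem.Int.band (Int.shiftRight alpha i.toNat) 1
                            + 2 * PySem.Int.band (Int.shiftRight beta i.toNat) 1).shiftLeft (2 * i).toNat)) 0
    -- Phase 2: emit the digits of the packed integer.
    let s := PySem.Str.join "" ((PySem.List.pyRange 0 (2 * n_orb)).map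
      (fun j => PySem.Int.toStr (PySem.Int.band (Int.shiftRight packed j.toNat) 1)))
    if endian = "big" then String.ofList s.toList.reverse  -- s[::-1]
    else s

-- ===== PRECONDITION & SPEC =====
-- A raises ValueError on any endian other than "big"/"little"; Pre_ excludes exactly those inputs.
def Pre_to_jw_bitstring (alpha : Int) (beta : Int) (n_orb : Int) (endian : String) : Prop :=
  endian = "big" ∨ endian = "little"
instance (alpha : Int) (beta : Int) (n_orb : Int) (endian : String) : Decidable (Pre_to_jw_bitstring alpha beta n_orb endian) := by unfold Pre_to_jw_bitstring; infer_instance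

def pvWitness_to_jw_bitstring : Int × Int × Int × String := (3, 5, 3, "big")

def Spec_to_jw_bitstring (alpha : Int) (beta : Int) (n_orb : Int) (endian : String) (out : String) : Prop := out = to_jw_bitstring_alt alpha beta n_orb endian
instance (alpha : Int) (beta : Int) (n_orb : Int) (endian : String) (out : String) : Decidable (Spec_to_jw_bitstring alpha beta n_orb endian out) := by unfold Spec_to_jw_bitstring; infer_instance

-- ===== CLAIM (what is proved, stated in full; the proofs are below) =====
def Claim_equal_to_jw_bitstring : Prop := ∀ (alpha : Int) (beta : Int) (n_orb : Int) (endian : String), Dom_to_jw_bitstring alpha beta n_orb endian → Pre_to_jw_bitstring alpha beta n_orb endian → Spec_to_jw_bitstring alpha beta n_orb endian (to_jw_bitstring alpha beta n_orb endian)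

-- ===== LEMMAS AND PROOFS =====

-- the occupation bit (x >> i) & 1 as a natural number
def pvBit (x : Int) (i : Nat) : Nat :=
  if PySem.Int.mod (Int.shiftRight x i) 2 = 0 then 0 else 1

-- the single character both programs emit for that bit
def pvCh (x : Int) (i : Nat) : Char :=
  if pvBit x i = 0 then '0' else '1'

theorem pvBit_le_one (x : Int) (i : Nat) : pvBit x i ≤ 1 := by
  unfold pvBit; split <;> omega

theorem band_one_eq_pvBit (x : Int) (i : Nat) :
    PySem.Int.band (Int.shiftRight x i) 1 = (pvBit x i : Int) := by
  rw [PySem.Int.band_one, pvBit]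
  rcases PySem.Int.mod_two_eq (Int.shiftRight x i) with h | h <;> rw [h] <;> simp

theorem toList_toStr_band_one (x : Int) (i : Nat) :
    (PySem.Int.toStr (PySem.Int.band (Int.shiftRight x i) 1)).toList = [pvCh x i] := by
  rw [band_one_eq_pvBit, pvCh]
  have := pvBit_le_one x i
  interval_cases h : pvBit x i <;> decide

theorem int_to_bitstring_one (x : Int) (i : Nat) :
    int_to_bitstring (Int.shiftRight x i) 1 = String.ofList [pvCh x i] := by
  apply String.toList_inj.mp
  have h1 : PySem.List.pyRange 0 1 = [0] := by decide
  rw [int_to_bitstring, h1, String.toList_ofList, PySem.Str.toList_join]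
  have h0 : Int.shiftRight (Int.shiftRight x i) ((0:Int).toNat) = Int.shiftRight x i := by
    cases Int.shiftRight x i <;> rfl
  rw [List.map_singleton, h0, List.map_singleton, toList_toStr_band_one,
      PySem.Chars.join_singleton]

-- the packed integer after n loop iterations
def pvPack (alpha beta : Int) : Nat → Nat
  | 0 => 0
  | n + 1 => pvPack alpha beta n + (pvBit alpha n + 2 * pvBit beta n) * 4 ^ n

theorem pvPack_lt (alpha beta : Int) (n : Nat) : pvPack alpha beta n < 4 ^ n := by
  induction n with
  | zero => simp [pvPack]
  | succ m ih =>
      have ha := pvBit_le_one alpha m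
      have hb := pvBit_le_one beta m
      have h4 : (4:Nat) ^ (m+1) = 4 * 4 ^ m := by ring
      have : (pvBit alpha m + 2 * pvBit beta m) * 4 ^ m ≤ 3 * 4 ^ m :=
        Nat.mul_le_mul_right _ (by omega)
      simp only [pvPack]; omega

-- Phase-1 invariant: the fold computes pvPack
theorem pvPack_fold (alpha beta : Int) (n_orb : Int) :
    (PySem.List.pyRange 0 n_orb).foldl
      (fun acc i => acc + ((PySem.Int.band (Int.shiftRight alpha i.toNat) 1
                            + 2 * PySem.Int.band (Int.shiftRight beta i.toNat) 1).shiftLeft (2 * i).toNat)) 0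
    = ((pvPack alpha beta n_orb.toNat : Nat) : Int) := by
  rw [PySem.List.pyRange_zero]
  induction n_orb.toNat with
  | zero => simp [pvPack]
  | succ m ih =>
      rw [List.range_succ, List.map_append, List.foldl_append, ih]
      simp only [List.map_singleton, List.foldl_cons, List.foldl_nil]
      rw [band_one_eq_pvBit, band_one_eq_pvBit]
      have ht : (2 * (m:Int)).toNat = 2 * m := by omega
      rw [ht, show ∀ (a : Int) (b : Nat), a.shiftLeft b = a * 2 ^ b from fun a b => Int.shiftLeft_eq a b]
      have hp : ((2:Int)) ^ (2 * m) = ((4 ^ m : Nat) : Int) := by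
        push_cast
        rw [pow_mul]; norm_num
      rw [hp]
      simp only [pvPack, Int.toNat_natCast]
      push_cast
      ring

-- Phase-2 digit extraction: bit j of the packed integer is the interleaved occupation bit
theorem pvPack_testBit (alpha beta : Int) (n j : Nat) (hj : j < 2 * n) :
    (pvPack alpha beta n >>> j) % 2
      = if j % 2 = 0 then pvBit alpha (j / 2) else pvBit beta (j / 2) := by
  induction n with
  | zero => omega
  | succ m ih =>
      have ha := pvBit_le_one alpha m
      have hb := pvBit_le_one beta m
      have hlt := pvPack_lt alpha beta m
      simp only [pvPack, Nat.shiftRight_eq_div_pow] at *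
      rcases Nat.lt_or_ge j (2 * m) with h | h
      · -- low bits unaffected by the new summand
        have hd : (4:Nat) ^ m = 2 ^ (2*m - j) * 2 ^ j := by
          rw [← pow_add]
          have he0 : 2*m - j + j = 2 * m := by omega
          rw [he0, pow_mul]; norm_num
        rw [hd, ← Nat.mul_assoc, Nat.add_mul_div_right _ _ (Nat.pow_pos (by omega))]
        have he : 2 ^ (2*m - j) = 2 * 2 ^ (2*m - j - 1) := by
          rw [← pow_succ']; congr 1; omega
        rw [← ih h, he]
        have hr : (pvBit alpha m + 2 * pvBit beta m) * (2 * 2 ^ (2*m - j - 1))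
            = 2 * ((pvBit alpha m + 2 * pvBit beta m) * 2 ^ (2*m - j - 1)) := by ring
        rw [hr]
        omega
      · -- j = 2m or j = 2m+1
        have h4 : (4:Nat) ^ m = 2 ^ (2*m) := by rw [pow_mul]; norm_num
        rcases Nat.lt_or_ge j (2*m + 1) with h1 | h1
        · have hj2 : j = 2 * m := by omega
          subst hj2
          have hz : pvPack alpha beta m / 2 ^ (2*m) = 0 :=
            Nat.div_eq_of_lt (h4 ▸ hlt)
          rw [h4, Nat.add_mul_div_right _ _ (Nat.pow_pos (by omega)), hz]
          have hm0 : (2 * m) % 2 = 0 := by omega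
          have hd0 : (2 * m) / 2 = m := by omega
          simp [hm0, hd0]
          omega
        · have hj2 : j = 2 * m + 1 := by omega
          subst hj2
          have h2 : (2:Nat) ^ (2*m+1) = 2 ^ (2*m) * 2 := by rw [pow_succ]
          have hz : pvPack alpha beta m / 2 ^ (2*m) = 0 :=
            Nat.div_eq_of_lt (h4 ▸ hlt)
          rw [h2, ← Nat.div_div_eq_div_mul, h4,
              Nat.add_mul_div_right _ _ (Nat.pow_pos (by omega)), hz]
          have hm1 : (2 * m + 1) % 2 = 1 := by omega
          have hd1 : (2 * m + 1) / 2 = m := by omega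
          simp [hm1, hd1]
          omega

-- interleaving per-orbital pairs = one flat pass over 2*n positions with parity/div arithmetic
theorem pvInterleave (ca cb : Nat → Char) (n : Nat) :
    (List.range n).flatMap (fun i => [ca i, cb i]) =
    (List.range (2 * n)).map (fun j => if j % 2 = 0 then ca (j / 2) else cb (j / 2)) := by
  induction n with
  | zero => simp
  | succ m ih =>
      have h2 : 2 * (m + 1) = (2 * m + 1) + 1 := by omega
      rw [List.range_succ, h2, List.range_succ, List.range_succ]
      simp only [List.flatMap_append, List.map_append, ih]
      have hm0 : (2 * m) % 2 = 0 := by omega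
      have hm1 : (2 * m + 1) % 2 = 1 := by omega
      simp [hm0, hm1]
      congr 1
      omega

-- A's bit list: a list of singleton strings over the interleaved characters
theorem pvA_bits (alpha beta : Int) (n_orb : Int) :
    (PySem.List.pyRange 0 n_orb).foldl
      (fun acc i => acc ++ [int_to_bitstring (Int.shiftRight alpha i.toNat) 1,
                            int_to_bitstring (Int.shiftRight beta i.toNat) 1]) []
    = ((List.range n_orb.toNat).flatMap
        (fun i : Nat => [pvCh alpha i, pvCh beta i])).map (fun c => String.ofList [c]) := by
  rw [PySem.List.foldl_append_eq_flatMap, PySem.List.pyRange_zero, List.flatMap_map,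
      List.map_flatMap, List.nil_append]
  refine List.flatMap_congr (fun k _ => ?_)
  simp [int_to_bitstring_one]

-- B's char list (little-endian form): decoding the packed integer gives the interleaved chars
theorem pvB_chars (alpha beta : Int) (n_orb : Int) :
    (PySem.Str.join "" ((PySem.List.pyRange 0 (2 * n_orb)).map
      (fun j => PySem.Int.toStr (PySem.Int.band
        (Int.shiftRight ((pvPack alpha beta n_orb.toNat : Nat) : Int) j.toNat) 1)))).toList
    = (List.range (2 * n_orb.toNat)).map
        (fun j : Nat => if j % 2 = 0 then pvCh alpha (j / 2) else pvCh beta (j / 2)) := by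
  have h2 : (2 * n_orb).toNat = 2 * n_orb.toNat := by omega
  rw [PySem.Str.toList_join, PySem.List.pyRange_zero, h2]
  simp only [List.map_map, Function.comp_def]
  have hk : ∀ k ∈ List.range (2 * n_orb.toNat),
      (PySem.Int.toStr (PySem.Int.band
        (Int.shiftRight ((pvPack alpha beta n_orb.toNat : Nat) : Int) ((k:Int)).toNat) 1)).toList
      = [if k % 2 = 0 then pvCh alpha (k / 2) else pvCh beta (k / 2)] := by
    intro k hk
    have hklt : k < 2 * n_orb.toNat := List.mem_range.mp hk
    have hsr : Int.shiftRight ((pvPack alpha beta n_orb.toNat : Nat) : Int) ((k:Int)).toNat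
        = (((pvPack alpha beta n_orb.toNat >>> k : Nat) : Int)) := by
      rw [Int.toNat_natCast]
      exact (Int.natCast_shiftRight _ _).symm
    rw [hsr, show (1:Int) = ((1:Nat):Int) from rfl, PySem.Int.band_natCast,
        Nat.and_one_is_mod, pvPack_testBit alpha beta n_orb.toNat k hklt]
    by_cases h : k % 2 = 0
    · simp only [h, reduceIte]
      have := pvBit_le_one alpha (k / 2)
      rw [pvCh]
      interval_cases hb : pvBit alpha (k / 2) <;> simp <;> decide
    · simp only [h, reduceIte]
      have := pvBit_le_one beta (k / 2)
      rw [pvCh]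
      interval_cases hb : pvBit beta (k / 2) <;> simp <;> decide
  rw [List.map_congr_left hk]
  have hsep : ("" : String).toList = ([] : List Char) := by decide
  have hjs := PySem.Chars.join_nil_singletons
    ((List.range (2 * n_orb.toNat)).map
      (fun j : Nat => if j % 2 = 0 then pvCh alpha (j / 2) else pvCh beta (j / 2)))
  simp only [List.map_map, Function.comp_def] at hjs
  rw [hsep, hjs]

-- ===== VERDICT (by name: the statement is the Claim_ definition above) =====
theorem to_jw_bitstring_spec : Claim_equal_to_jw_bitstring := by
  intro alpha beta n_orb endian _ hpre
  unfold Spec_to_jw_bitstring to_jw_bitstring to_jw_bitstring_alt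
  have hA := pvA_bits alpha beta n_orb
  have hP := pvPack_fold alpha beta n_orb
  have hI := pvInterleave (pvCh alpha) (pvCh beta) n_orb.toNat
  have hsing : ∀ cs : List Char,
      PySem.Chars.join ([] : List Char) ((cs.map (fun c => String.ofList [c])).map String.toList) = cs := by
    intro cs
    have hjs := PySem.Chars.join_nil_singletons cs
    rw [List.map_map]
    simp only [Function.comp_def, String.toList_ofList]
    exact hjs
  rcases hpre with h | h <;> subst h <;>
    simp only [String.reduceEq, ne_eq, not_true_eq_false, not_false_eq_true,
      and_true, and_false, if_false, if_true, hP] <;>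
    apply String.toList_inj.mp
  · -- big endian
    have hB := pvB_chars alpha beta n_orb
    rw [PySem.Str.toList_join, hA, String.toList_ofList, String.toList_ofList, hB,
        ← List.map_reverse, hsing, hI]
  · -- little endian
    have hB := pvB_chars alpha beta n_orb
    have hsep : ("" : String).toList = ([] : List Char) := by decide
    rw [PySem.Str.toList_join, hsep, hA, hB, hsing, hI]
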